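-- pv_equiv track=rewrite | github.com/sajjadium/ctf-archives | ASIS/2021/Quals/crypto/LagLeg/LagLeg.py | lag
-- ===== SOURCE A (Python) =====
-- def lag(k, a, n):
-- 	s, t = 2, a
-- 	if k == 0:
-- 		return 2
-- 	r = 0
-- 	while k % 2 == 0:
-- 		r += 1
-- 		k //= 2
-- 	B = bin(k)[2:]
-- 	for b in B:
-- 		if b == '0':
-- 			t = (s * t - a) % n
-- 			s = (s **2 - 2) % n
-- 		else:
-- 			s = (s * t - a) % n
-- 			t = (t** 2 - 2) % n
-- 	for _ in range(r):
-- 		s = (s ** 2 - 2) % n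
-- 	return s
-- ===== SOURCE B (Python) =====
-- def lag(k, a, n):
--     if k == 0:
--         return 2
--     def f(j):
--         if j == 0:
--             return (2, a)
--         u, v = f(j // 2)
--         if j % 2 == 0:
--             return ((u * u - 2) % n, (u * v - a) % n)
--         return ((u * v - a) % n, (v * v - 2) % n)
--     return f(k)[0]
-- ===== Notes on version B (the rewrite author's own statement) =====
-- stated objective: simpler
-- what changed: Replaces the trailing-zero stripping loop, the bin() string scan and the final squaring loop with a single divide-and-conquer recursion f(k) = (V_k mod n, V_{k+1} mod n) on k//2 using the Lucas doubling identities.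
-- outside the precondition, e.g. on lag(-6, 3, 7): A returns 0, B raises RecursionError
import Mathlib
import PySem

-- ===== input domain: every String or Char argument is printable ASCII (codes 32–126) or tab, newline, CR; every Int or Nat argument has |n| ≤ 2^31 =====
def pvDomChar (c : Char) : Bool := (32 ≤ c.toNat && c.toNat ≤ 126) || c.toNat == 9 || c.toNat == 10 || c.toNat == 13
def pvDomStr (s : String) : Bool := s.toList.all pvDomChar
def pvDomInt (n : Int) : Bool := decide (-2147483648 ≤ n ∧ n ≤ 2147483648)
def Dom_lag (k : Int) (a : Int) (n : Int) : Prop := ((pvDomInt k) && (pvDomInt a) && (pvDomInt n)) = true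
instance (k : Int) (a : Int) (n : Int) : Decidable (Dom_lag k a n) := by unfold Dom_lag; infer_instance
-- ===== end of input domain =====

-- B replaces A's trailing-zero stripping loop + bin() string scan + final squaring loop by one
-- divide-and-conquer recursion on k//2 using the Lucas doubling identities (objective: simpler).

-- ===== PORT A =====
-- one step of A's for-loop over the characters of bin(k)[2:] (state = (s, t))
def lagLadderStep (a n : Int) (st : Int × Int) (b : Char) : Int × Int :=
  if b = '0' then
    (PySem.Int.mod (st.1 * st.1 - 2) n, PySem.Int.mod (st.1 * st.2 - a) n)
  else
    (PySem.Int.mod (st.1 * st.2 - a) n, PySem.Int.mod (st.2 * st.2 - 2) n)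

-- A's 'while k % 2 == 0: r += 1; k //= 2'; the 'k ≠ 0' conjunct only makes the loop total
-- (Python diverges at k = 0, which A's early return makes unreachable)
def lagStrip (k : Int) : Int × Nat :=
  if h : PySem.Int.mod k 2 = 0 ∧ k ≠ 0 then
    let p := lagStrip (PySem.Int.floordiv k 2)
    (p.1, p.2 + 1)
  else (k, 0)
termination_by k.natAbs
decreasing_by
  obtain ⟨m, hm⟩ := (PySem.Int.mod_eq_zero_iff_dvd k 2).mp h.1
  have h2 : PySem.Int.floordiv k 2 = m :=
    (PySem.Int.floordiv_eq_iff_of_pos (by omega)).mpr (by omega)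
  have hk := h.2
  rw [h2]
  omega

def lag (k : Int) (a : Int) (n : Int) : Int :=
  if k = 0 then 2
  else
    let p := lagStrip k
    -- bin(k)[2:] : slice with nonnegative start = List.drop 2 on the characters
    let B := (PySem.Int.toBinChars0b p.1).drop 2
    let st := B.foldl (lagLadderStep a n) (2, a)
    (List.range p.2).foldl (fun s _ => PySem.Int.mod (s * s - 2) n) st.1

-- ===== PORT B =====
-- B's inner recursion f(j) = (V_j mod n, V_{j+1} mod n); Pre_ gives 0 ≤ k, so j ranges over Nat
-- and Python's j // 2, j % 2 are Nat division/mod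
def lucPair (a n : Int) : Nat → Int × Int
  | 0 => (2, a)
  | (j+1) =>
    let p := lucPair a n ((j+1)/2)
    if (j+1) % 2 = 0 then
      (PySem.Int.mod (p.1 * p.1 - 2) n, PySem.Int.mod (p.1 * p.2 - a) n)
    else
      (PySem.Int.mod (p.1 * p.2 - a) n, PySem.Int.mod (p.2 * p.2 - 2) n)
termination_by j => j
decreasing_by exact Nat.div_lt_self (Nat.succ_pos j) (by omega)

def lag_alt (k : Int) (a : Int) (n : Int) : Int :=
  if k = 0 then 2 else (lucPair a n k.toNat).1

-- ===== PRECONDITION & SPEC =====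
-- Pre_ excludes n = 0 with k ≠ 0, where A raises ZeroDivisionError, and negative k, where A's
-- bin(k)[2:] slices into the '-0b' prefix and feeds the letter 'b' into the bit loop (a string
-- artefact) while B's recursion on k//2 does not terminate (RecursionError).
def Pre_lag (k : Int) (a : Int) (n : Int) : Prop := 0 ≤ k ∧ (k = 0 ∨ n ≠ 0)
instance (k : Int) (a : Int) (n : Int) : Decidable (Pre_lag k a n) := by unfold Pre_lag; infer_instance

def pvWitness_lag : Int × Int × Int := (6, 3, 7)

def Spec_lag (k : Int) (a : Int) (n : Int) (out : Int) : Prop := out = lag_alt k a n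
instance (k : Int) (a : Int) (n : Int) (out : Int) : Decidable (Spec_lag k a n out) := by unfold Spec_lag; infer_instance

-- ===== CLAIM (what is proved, stated in full; the proofs are below) =====
def Claim_equal_lag : Prop := ∀ (k : Int) (a : Int) (n : Int), Dom_lag k a n → Pre_lag k a n → Spec_lag k a n (lag k a n)

-- ===== LEMMAS AND PROOFS =====

-- the Lucas sequence V_0 = 2, V_1 = a, V_{m+2} = a·V_{m+1} − V_m (over Int, no reduction)
def V (a : Int) : Nat → Int
  | 0 => 2
  | 1 => a
  | (m+2) => a * V a (m+1) - V a m

lemma V_cross (a : Int) (m : Nat) :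
    ∀ j, V a (m+j+2) * V a j - V a (m+j+1) * V a (j+1) = V a (m+2) - V a m := by
  intro j
  induction j with
  | zero => simp [V]; ring
  | succ j ih =>
    have e1 : V a (m+(j+1)+2) = a * V a (m+j+2) - V a (m+j+1) := by
      have e : m+(j+1)+2 = (m+j+1)+2 := by omega
      rw [e]; rfl
    have e2 : V a (j+2) = a * V a (j+1) - V a j := rfl
    have e3 : m+(j+1)+1 = m+j+2 := by omega
    rw [e1, e3, e2]
    linear_combination ih

lemma V_add (a : Int) : ∀ j m, V a (m + j + j) = V a (m + j) * V a j - V a m := by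
  intro j
  induction j with
  | zero => intro m; simp [V]; ring
  | succ j ih =>
    intro m
    have e : m + (j+1) + (j+1) = (m+2) + j + j := by omega
    rw [e, ih (m+2)]
    have hc := V_cross a m j
    have e2 : m+2+j = m+j+2 := by omega
    have e3 : m + (j+1) = m+j+1 := by omega
    rw [e2, e3]
    linear_combination hc

lemma V_double (a : Int) (j : Nat) : V a (j + j) = V a j * V a j - 2 := by
  have h := V_add a j 0
  simpa [V] using h

lemma V_doubleS (a : Int) (j : Nat) : V a (j + j + 1) = V a j * V a (j+1) - a := by
  have h := V_add a j 1
  have e : 1 + j + j = j + j + 1 := by omega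
  have e2 : 1 + j = j + 1 := by omega
  rw [e, e2] at h
  rw [h]
  simp [V]; ring

lemma pymod_sub_dvd (x n : Int) : n ∣ (x - PySem.Int.mod x n) := by
  refine ⟨PySem.Int.floordiv x n, ?_⟩
  have h := PySem.Int.floordiv_mul_add_mod x n
  linarith [mul_comm n (PySem.Int.floordiv x n)]

lemma pymod_congr {n : Int} (hn : n ≠ 0) {x y : Int} (h : n ∣ (x - y)) :
    PySem.Int.mod x n = PySem.Int.mod y n := by
  have hx := pymod_sub_dvd x n
  have hy := pymod_sub_dvd y n
  have hd : n ∣ (PySem.Int.mod x n - PySem.Int.mod y n) := by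
    have e : PySem.Int.mod x n - PySem.Int.mod y n
        = (x - PySem.Int.mod x n) * (-1) + (y - PySem.Int.mod y n) + (x - y) := by ring
    rw [e]
    exact dvd_add (dvd_add (Dvd.dvd.mul_right hx _) hy) h
  have hz : PySem.Int.mod x n - PySem.Int.mod y n = 0 := by
    have hd' : |n| ∣ (PySem.Int.mod x n - PySem.Int.mod y n) := (abs_dvd _ _).mpr hd
    apply Int.eq_zero_of_abs_lt_dvd hd'
    rcases lt_or_gt_of_ne hn with hneg | hpos
    · have b1 := PySem.Int.mod_neg_bounds x hneg
      have b2 := PySem.Int.mod_neg_bounds y hneg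
      rw [abs_lt, abs_of_neg hneg]
      omega
    · have b1 := PySem.Int.mod_nonneg x hpos
      have b2 := PySem.Int.mod_lt x hpos
      have b3 := PySem.Int.mod_nonneg y hpos
      have b4 := PySem.Int.mod_lt y hpos
      rw [abs_lt, abs_of_pos hpos]
      omega
  omega

lemma pv_dvd_mul_sub_mul {n X Y u v : Int} (hu : n ∣ X - u) (hv : n ∣ Y - v) :
    n ∣ (u * v - X * Y) := by
  have e : u * v - X * Y = (X - u) * (-v) + (Y - v) * (-X) := by ring
  rw [e]
  exact dvd_add (hu.mul_right _) (hv.mul_right _)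

-- the three combine shapes both ports use, on reduced arguments u = V_j mod n, v = V_{j+1} mod n
lemma comb0 {n : Int} (hn : n ≠ 0) (a : Int) (j : Nat) :
    PySem.Int.mod (PySem.Int.mod (V a j) n * PySem.Int.mod (V a j) n - 2) n
      = PySem.Int.mod (V a (j + j)) n := by
  apply pymod_congr hn
  rw [V_double]
  have hu := pymod_sub_dvd (V a j) n
  have e : PySem.Int.mod (V a j) n * PySem.Int.mod (V a j) n - 2 - (V a j * V a j - 2)
      = PySem.Int.mod (V a j) n * PySem.Int.mod (V a j) n - V a j * V a j := by ring
  rw [e]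
  exact pv_dvd_mul_sub_mul hu hu

lemma comb1 {n : Int} (hn : n ≠ 0) (a : Int) (j : Nat) :
    PySem.Int.mod (PySem.Int.mod (V a j) n * PySem.Int.mod (V a (j+1)) n - a) n
      = PySem.Int.mod (V a (j + j + 1)) n := by
  apply pymod_congr hn
  rw [V_doubleS]
  have hu := pymod_sub_dvd (V a j) n
  have hv := pymod_sub_dvd (V a (j+1)) n
  have e : PySem.Int.mod (V a j) n * PySem.Int.mod (V a (j+1)) n - a - (V a j * V a (j+1) - a)
      = PySem.Int.mod (V a j) n * PySem.Int.mod (V a (j+1)) n - V a j * V a (j+1) := by ring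
  rw [e]
  exact pv_dvd_mul_sub_mul hu hv

lemma comb2 {n : Int} (hn : n ≠ 0) (a : Int) (j : Nat) :
    PySem.Int.mod (PySem.Int.mod (V a (j+1)) n * PySem.Int.mod (V a (j+1)) n - 2) n
      = PySem.Int.mod (V a (j + j + 2)) n := by
  have h := comb0 hn a (j+1)
  have e : j + 1 + (j + 1) = j + j + 2 := by omega
  rw [e] at h
  exact h

lemma lucPair_spec (a : Int) {n : Int} (hn : n ≠ 0) :
    ∀ k : Nat, 1 ≤ k → lucPair a n k = (PySem.Int.mod (V a k) n, PySem.Int.mod (V a (k+1)) n) := by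
  intro k
  induction k using Nat.strong_induction_on with
  | _ k ih =>
    intro hk
    match k, hk with
    | 1, _ =>
      rw [lucPair]
      norm_num [lucPair]
      constructor
      · apply pymod_congr hn
        have e : (2 : Int) * a - a - V a 1 = 0 := by
          rw [show V a 1 = a from rfl]; ring
        rw [e]; exact dvd_zero n
      · apply pymod_congr hn
        have e : a * a - 2 - V a 2 = 0 := by
          rw [show V a 2 = a * V a 1 - V a 0 from rfl, show V a 1 = a from rfl,
              show V a 0 = 2 from rfl]; ring
        rw [e]; exact dvd_zero n
    | (j+2), _ =>
      rw [lucPair]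
      have hdiv : 1 ≤ (j+2)/2 := by omega
      have hlt : (j+2)/2 < j+2 := by omega
      have hp := ih _ hlt hdiv
      set h2 := (j+2)/2 with hh
      by_cases hpar : (j+2) % 2 = 0
      · have he : j + 2 = h2 + h2 := by omega
        simp only [hp, hpar, if_pos]
        have c0 := comb0 hn a h2
        have c1 := comb1 hn a h2
        rw [← he] at c0 c1
        have e1 : j + 2 + 1 = h2 + h2 + 1 := by omega
        simp [c0, c1, ← he, e1]
      · have he : j + 2 = h2 + h2 + 1 := by omega
        simp only [hp, hpar, if_false]
        have c1 := comb1 hn a h2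
        have c2 := comb2 hn a h2
        rw [← he] at c1
        have e2 : j + 2 + 1 = h2 + h2 + 2 := by omega
        rw [← e2] at c2
        simp [c1, c2]

lemma toDigitsCore_acc (b : Nat) : ∀ (f n : Nat) (ds : List Char),
    Nat.toDigitsCore b f n ds = Nat.toDigitsCore b f n [] ++ ds := by
  intro f
  induction f with
  | zero => intro n ds; simp [Nat.toDigitsCore]
  | succ f ih =>
    intro n ds
    simp only [Nat.toDigitsCore]
    by_cases h : n / b = 0
    · simp [h]
    · simp only [h, if_false]
      rw [ih (n / b) (Nat.digitChar (n % b) :: ds), ih (n / b) [Nat.digitChar (n % b)]]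
      simp

lemma toDigitsCore_fuel (b : Nat) (hb : 2 ≤ b) : ∀ (n f1 f2 : Nat), n < f1 → n < f2 →
    ∀ ds, Nat.toDigitsCore b f1 n ds = Nat.toDigitsCore b f2 n ds := by
  intro n
  induction n using Nat.strong_induction_on with
  | _ n ih =>
    intro f1 f2 h1 h2 ds
    obtain ⟨g1, rfl⟩ : ∃ g, f1 = g + 1 := ⟨f1 - 1, by omega⟩
    obtain ⟨g2, rfl⟩ : ∃ g, f2 = g + 1 := ⟨f2 - 1, by omega⟩
    simp only [Nat.toDigitsCore]
    by_cases h : n / b = 0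
    · simp [h]
    · simp only [h, if_false]
      have hn0 : 0 < n := Nat.pos_of_ne_zero (fun hn => h (by simp [hn]))
      have hdl : n / b < n := Nat.div_lt_self hn0 (by omega)
      exact ih (n / b) hdl g1 g2 (by omega) (by omega) _

lemma toDigits_two_step (m : Nat) (h : 2 ≤ m) :
    Nat.toDigits 2 m = Nat.toDigits 2 (m/2) ++ [Nat.digitChar (m % 2)] := by
  show Nat.toDigitsCore 2 (m+1) m [] = Nat.toDigitsCore 2 (m/2+1) (m/2) [] ++ [Nat.digitChar (m % 2)]
  have hd : m / 2 ≠ 0 := by omega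
  simp only [Nat.toDigitsCore, hd, if_false]
  rw [toDigitsCore_acc]
  congr 1
  exact toDigitsCore_fuel 2 (by omega) (m/2) m (m/2+1) (by omega) (by omega) []

lemma ladder_spec (a : Int) {n : Int} (hn : n ≠ 0) :
    ∀ m : Nat, 1 ≤ m →
      (Nat.toDigits 2 m).foldl (lagLadderStep a n) (2, a)
        = (PySem.Int.mod (V a m) n, PySem.Int.mod (V a (m+1)) n) := by
  intro m
  induction m using Nat.strong_induction_on with
  | _ m ih =>
    intro hm
    match m, hm with
    | 1, _ =>
      rw [show Nat.toDigits 2 1 = ['1'] from by decide]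
      simp only [List.foldl_cons, List.foldl_nil, lagLadderStep]
      rw [if_neg (show ¬('1':Char) = '0' from by decide), Prod.mk.injEq]
      constructor
      · apply pymod_congr hn
        have e : (2 : Int) * a - a - V a 1 = 0 := by
          rw [show V a 1 = a from rfl]; ring
        rw [e]; exact dvd_zero n
      · apply pymod_congr hn
        have e : a * a - 2 - V a 2 = 0 := by
          rw [show V a 2 = a * V a 1 - V a 0 from rfl, show V a 1 = a from rfl,
              show V a 0 = 2 from rfl]; ring
        rw [e]; exact dvd_zero n
    | (j+2), _ =>
      rw [toDigits_two_step (j+2) (by omega), List.foldl_append]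
      have hdiv : 1 ≤ (j+2)/2 := by omega
      have hlt : (j+2)/2 < j+2 := by omega
      rw [ih _ hlt hdiv]
      set h2 := (j+2)/2 with hh
      by_cases hpar : (j+2) % 2 = 0
      · have he : j + 2 = h2 + h2 := by omega
        have hc : Nat.digitChar ((j+2) % 2) = '0' := by rw [hpar]; rfl
        simp only [List.foldl_cons, List.foldl_nil, hc, lagLadderStep]
        simp only [if_true]
        have c0 := comb0 hn a h2
        have c1 := comb1 hn a h2
        rw [← he] at c0 c1
        have e1 : j + 2 + 1 = h2 + h2 + 1 := by omega
        simp [c0, c1, ← he, e1]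
      · have hpar1 : (j+2) % 2 = 1 := by omega
        have he : j + 2 = h2 + h2 + 1 := by omega
        have hc : Nat.digitChar ((j+2) % 2) = '1' := by rw [hpar1]; rfl
        simp only [List.foldl_cons, List.foldl_nil, hc, lagLadderStep]
        rw [if_neg (show ¬('1':Char) = '0' from by decide)]
        have c1 := comb1 hn a h2
        have c2 := comb2 hn a h2
        rw [← he] at c1
        have e2 : j + 2 + 1 = h2 + h2 + 2 := by omega
        rw [← e2] at c2
        simp [c1, c2]

lemma sq_fold (a : Int) {n : Int} (hn : n ≠ 0) (m : Nat) :
    ∀ r : Nat,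
      (List.range r).foldl (fun s _ => PySem.Int.mod (s * s - 2) n) (PySem.Int.mod (V a m) n)
        = PySem.Int.mod (V a (m * 2^r)) n := by
  intro r
  induction r with
  | zero => simp
  | succ r ih =>
    rw [List.range_succ, List.foldl_append, ih]
    simp only [List.foldl_cons, List.foldl_nil]
    have c0 := comb0 hn a (m * 2^r)
    have e : m * 2^r + m * 2^r = m * 2^(r+1) := by rw [pow_succ]; ring
    rw [e] at c0
    exact c0

lemma lagStrip_spec : ∀ k : Int, 0 < k →
    0 < (lagStrip k).1 ∧ (lagStrip k).1 * 2^((lagStrip k).2) = k := by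
  intro k
  induction k using lagStrip.induct with
  | case1 k h ih =>
    intro hk
    obtain ⟨m, hm⟩ := (PySem.Int.mod_eq_zero_iff_dvd k 2).mp h.1
    have h2 : PySem.Int.floordiv k 2 = m :=
      (PySem.Int.floordiv_eq_iff_of_pos (by omega)).mpr (by omega)
    rw [h2] at ih
    have hmpos : 0 < m := by omega
    obtain ⟨ih1, ih2⟩ := ih hmpos
    rw [lagStrip, dif_pos h, h2]
    refine ⟨ih1, ?_⟩
    simp only
    rw [pow_succ, ← mul_assoc, ih2]
    omega
  | case2 k h =>
    intro hk
    rw [lagStrip, dif_neg h]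
    norm_num
    omega

-- ===== VERDICT (by name: the statement is the Claim_ definition above) =====
theorem lag_spec : Claim_equal_lag := by
  intro k a n _ hpre
  unfold Spec_lag
  by_cases hk : k = 0
  · simp [lag, lag_alt, hk]
  · obtain ⟨hk0, hn'⟩ := hpre
    have hn : n ≠ 0 := hn'.resolve_left hk
    have hkpos : 0 < k := by omega
    obtain ⟨hm, hmul⟩ := lagStrip_spec k hkpos
    unfold lag lag_alt
    simp only [hk, if_false]
    have hbin : (PySem.Int.toBinChars0b (lagStrip k).1).drop 2
        = Nat.toDigits 2 (lagStrip k).1.toNat := by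
      simp [PySem.Int.toBinChars0b, not_lt.mpr (le_of_lt hm)]
    rw [hbin]
    have h1 : 1 ≤ (lagStrip k).1.toNat := by omega
    rw [ladder_spec a hn _ h1]
    simp only
    rw [sq_fold a hn _ ((lagStrip k).2)]
    rw [lucPair_spec a hn k.toNat (by omega)]
    simp only
    congr 2
    have hcast : (((lagStrip k).1.toNat * 2^((lagStrip k).2) : Nat) : Int) = ((k.toNat : Nat) : Int) := by
      push_cast
      rw [Int.toNat_of_nonneg (le_of_lt hm), Int.toNat_of_nonneg (le_of_lt hkpos)]
      exact hmul
    exact_mod_cast hcast
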